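-- pv_equiv track=rewrite | github.com/drybell/CEEO2020 | Onshape+/contour-onshape/pixel-data.py | gatherOuterPoints
-- ===== SOURCE A (Python) =====
-- def gatherOuterPoints(plot):
-- 	max_x = len(plot)
-- 	max_y = len(plot[0])
-- 	outer_pixels = []
--
-- 	# Top down = for each x array, iterate through y arrays + and find first 1
-- 	for x in range(max_x):
-- 		for y in range(max_y):
-- 			if plot[x][y] == "1":
-- 				outer_pixels.append([x,y])
-- 				break
--
-- 	# Left right = for each position in y, iterate through the same position of x
-- 	for y in range(max_y):
-- 		for x in range(max_x):
-- 			if plot[x][y] == "1":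
-- 				outer_pixels.append([x,y])
-- 				break
--
-- 	# Down up = At the ends of each y, count down until you reach a 1
-- 	for x in range(max_x):
-- 		for y in range(max_y - 1, -1, -1):
-- 			if plot[x][y] == "1":
-- 				outer_pixels.append([x,y])
-- 				break
--
-- 	#Right left = At the ends of x, count backwards through x
-- 	for y in range(max_y -1, -1, -1):
-- 		for x in range(max_x - 1, -1, -1):
-- 			if plot[x][y] == "1":
-- 				outer_pixels.append([x,y])
-- 				break
--
-- 	purged = []
-- 	for item in outer_pixels:
-- 		if item not in purged:
-- 			purged.append(item)
--
-- 	return purged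
-- ===== SOURCE B (Python) =====
-- def gatherOuterPoints(plot):
--     max_x = len(plot)
--     max_y = len(plot[0])
--     # one pass over the grid filling four boundary tables
--     row_first = [None] * max_x
--     row_last = [None] * max_x
--     col_first = [None] * max_y
--     col_last = [None] * max_y
--     for x in range(max_x):
--         for y in range(max_y):
--             if plot[x][y] == "1":
--                 if row_first[x] is None:
--                     row_first[x] = y
--                 row_last[x] = y
--                 if col_first[y] is None:
--                     col_first[y] = x
--                 col_last[y] = x
--     # assemble in A's four phase orders, skipping empty rows/columns
--     phases = ([(x, row_first[x]) for x in range(max_x)]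
--               + [(col_first[y], y) for y in range(max_y)]
--               + [(x, row_last[x]) for x in range(max_x)]
--               + [(col_last[y], y) for y in range(max_y - 1, -1, -1)])
--     out, seen = [], set()
--     for x, y in phases:
--         if x is not None and y is not None and (x, y) not in seen:
--             seen.add((x, y))
--             out.append([x, y])
--     return out
-- ===== Notes on version B (the rewrite author's own statement) =====
-- stated objective: faster
-- what changed: Instead of A's four directional break-scan passes over the grid plus a quadratic list-membership purge, B makes ONE pass over the grid filling four boundary tables (row_first/row_last/col_first/col_last) and then assembles the four phases by reading the tables, deduplicating with an O(1)-lookup seen-set.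
import Mathlib
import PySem

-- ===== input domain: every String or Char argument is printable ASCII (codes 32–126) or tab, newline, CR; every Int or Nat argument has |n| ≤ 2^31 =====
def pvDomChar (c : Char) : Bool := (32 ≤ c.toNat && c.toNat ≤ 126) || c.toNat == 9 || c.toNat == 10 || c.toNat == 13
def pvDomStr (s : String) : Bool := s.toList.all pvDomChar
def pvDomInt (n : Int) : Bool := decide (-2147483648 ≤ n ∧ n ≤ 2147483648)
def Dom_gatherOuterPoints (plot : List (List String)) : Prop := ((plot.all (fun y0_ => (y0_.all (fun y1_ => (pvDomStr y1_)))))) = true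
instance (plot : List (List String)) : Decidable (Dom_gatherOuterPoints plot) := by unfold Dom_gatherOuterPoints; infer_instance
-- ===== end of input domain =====

-- B replaces A's four directional break-scans and quadratic list-membership purge by ONE pass
-- over the grid that fills four boundary tables (row_first/row_last/col_first/col_last), then
-- assembles the four phases from the tables with a seen-set dedup; return-value equivalence on Pre_.

-- ===== PORT A =====
-- inner 'for …: if plot[..] == "1": append; break' loop: first index hit, scanning the given index list
def pvScanBreak (get : Int → String) : List Int → Option Int
  | [] => none
  | y :: t => if get y == "1" then some y else pvScanBreak get t

def gatherOuterPoints (plot : List (List String)) : List (List Int) :=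
  let max_x : Int := (plot.length : Int)
  let max_y : Int := ((PySem.List.pyGetD plot 0 []).length : Int)
  let outer1 := (PySem.List.pyRange 0 max_x 1).foldl (fun acc x =>
      match pvScanBreak (fun y => PySem.List.pyGetD (PySem.List.pyGetD plot x []) y "") (PySem.List.pyRange 0 max_y 1) with
      | some y => acc ++ [[x, y]]
      | none => acc) ([] : List (List Int))
  let outer2 := (PySem.List.pyRange 0 max_y 1).foldl (fun acc y =>
      match pvScanBreak (fun x => PySem.List.pyGetD (PySem.List.pyGetD plot x []) y "") (PySem.List.pyRange 0 max_x 1) with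
      | some x => acc ++ [[x, y]]
      | none => acc) outer1
  let outer3 := (PySem.List.pyRange 0 max_x 1).foldl (fun acc x =>
      match pvScanBreak (fun y => PySem.List.pyGetD (PySem.List.pyGetD plot x []) y "") (PySem.List.pyRange (max_y - 1) (-1) (-1)) with
      | some y => acc ++ [[x, y]]
      | none => acc) outer2
  let outer4 := (PySem.List.pyRange (max_y - 1) (-1) (-1)).foldl (fun acc y =>
      match pvScanBreak (fun x => PySem.List.pyGetD (PySem.List.pyGetD plot x []) y "") (PySem.List.pyRange (max_x - 1) (-1) (-1)) with
      | some x => acc ++ [[x, y]]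
      | none => acc) outer3
  outer4.foldl (fun purged item => if purged.contains item then purged else purged ++ [item]) []

-- ===== PORT B =====
-- loop body of B's single grid pass: on a "1" cell update the four boundary tables
-- (st = (row_first, row_last, col_first, col_last); 'tbl[i] = v' is pySetD, 'tbl[i] is None' is '= none')
def pvStep (plot : List (List String)) (x : Int)
    (st : List (Option Int) × List (Option Int) × List (Option Int) × List (Option Int))
    (y : Int) : List (Option Int) × List (Option Int) × List (Option Int) × List (Option Int) :=
  if PySem.List.pyGetD (PySem.List.pyGetD plot x []) y "" == "1" then
    ((if PySem.List.pyGetD st.1 x none = none then PySem.List.pySetD st.1 x (some y) else st.1),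
     PySem.List.pySetD st.2.1 x (some y),
     (if PySem.List.pyGetD st.2.2.1 y none = none then PySem.List.pySetD st.2.2.1 y (some x) else st.2.2.1),
     PySem.List.pySetD st.2.2.2 y (some x))
  else st

def gatherOuterPoints_alt (plot : List (List String)) : List (List Int) :=
  let max_x : Int := (plot.length : Int)
  let max_y : Int := ((PySem.List.pyGetD plot 0 []).length : Int)
  let tb := (PySem.List.pyRange 0 max_x 1).foldl
      (fun st x => (PySem.List.pyRange 0 max_y 1).foldl (pvStep plot x) st)
      (List.replicate max_x.toNat none, List.replicate max_x.toNat none,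
       List.replicate max_y.toNat none, List.replicate max_y.toNat none)
  let phases : List (Option Int × Option Int) :=
    (PySem.List.pyRange 0 max_x 1).map (fun x => (some x, PySem.List.pyGetD tb.1 x none))
    ++ (PySem.List.pyRange 0 max_y 1).map (fun y => (PySem.List.pyGetD tb.2.2.1 y none, some y))
    ++ (PySem.List.pyRange 0 max_x 1).map (fun x => (some x, PySem.List.pyGetD tb.2.1 x none))
    ++ (PySem.List.pyRange (max_y - 1) (-1) (-1)).map (fun y => (PySem.List.pyGetD tb.2.2.2 y none, some y))
  (phases.foldl (fun acc p =>
      match p with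
      | (some x, some y) =>
          if PySem.Set.contains acc.2 (x, y) then acc
          else (acc.1 ++ [[x, y]], PySem.Set.add acc.2 (x, y))
      | _ => acc)
    (([] : List (List Int)), (PySem.Set.empty : PySem.Set (Int × Int)))).1

-- ===== PRECONDITION & SPEC =====
-- A indexes plot[0] and plot[x][y] for all y < len(plot[0]): it raises IndexError on an empty
-- plot and whenever some row is shorter than the first row (B raises there too).
def Pre_gatherOuterPoints (plot : List (List String)) : Prop :=
  plot ≠ [] ∧ ∀ r ∈ plot, (plot.headD []).length ≤ r.length
instance (plot : List (List String)) : Decidable (Pre_gatherOuterPoints plot) := by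
  unfold Pre_gatherOuterPoints; infer_instance

def pvWitness_gatherOuterPoints : List (List String) :=
  [["0", "1", "0"], ["1", "1", "0"], ["0", "0", "0"]]

def Spec_gatherOuterPoints (plot : List (List String)) (out : List (List Int)) : Prop := out = gatherOuterPoints_alt plot
instance (plot : List (List String)) (out : List (List Int)) : Decidable (Spec_gatherOuterPoints plot out) := by unfold Spec_gatherOuterPoints; infer_instance

-- ===== CLAIM (what is proved, stated in full; the proofs are below) =====
def Claim_equal_gatherOuterPoints : Prop := ∀ (plot : List (List String)), Dom_gatherOuterPoints plot → Pre_gatherOuterPoints plot → Spec_gatherOuterPoints plot (gatherOuterPoints plot)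

-- ===== LEMMAS AND PROOFS =====

-- first/last index of "1" in a sequence, as produced by A's ascending/descending scans
def pvFirstIdx (l : List String) : Option Int :=
  (PySem.List.index? l "1").map (fun k => (k : Int))

def pvLastIdx (l : List String) : Option Int :=
  (PySem.List.index? l.reverse "1").map (fun k => (l.length : Int) - 1 - (k : Int))

-- 'tbl[i] = v' when the option carries a value, else no write
def pvUpd (t : List (Option Int)) (i : Nat) (o : Option Int) : List (Option Int) :=
  match o with
  | some v => t.set i (some v)
  | none => t

def pvToL (p : Int × Int) : List Int := [p.1, p.2]

def pvOptPair (o : Option Int) (mk : Int → Int × Int) : List (Int × Int) :=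
  match o with
  | some v => [mk v]
  | none => []

def pvPairOpt (p : Option Int × Option Int) : Option (Int × Int) :=
  match p with
  | (some x, some y) => some (x, y)
  | _ => none

def pvRow (plot : List (List String)) (x : Int) : List String :=
  List.take (PySem.List.pyGetD plot 0 []).length (plot.getD x.toNat [])

def pvCol (plot : List (List String)) (y : Int) : List String :=
  List.map (fun r => PySem.List.pyGetD r y "")
    (List.map (fun r => List.take (PySem.List.pyGetD plot 0 []).length r) plot)

def pvP1 (plot : List (List String)) : List (Int × Int) :=
  (PySem.List.pyRange 0 (plot.length : Int) 1).flatMap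
    (fun x => pvOptPair ((PySem.List.index? (pvRow plot x) "1").map (fun k => (k : Int))) (fun v => (x, v)))

def pvP2 (plot : List (List String)) : List (Int × Int) :=
  (PySem.List.pyRange 0 ((PySem.List.pyGetD plot 0 []).length : Int) 1).flatMap
    (fun y => pvOptPair ((PySem.List.index? (pvCol plot y) "1").map (fun k => (k : Int))) (fun v => (v, y)))

def pvP3 (plot : List (List String)) : List (Int × Int) :=
  (PySem.List.pyRange 0 (plot.length : Int) 1).flatMap
    (fun x => pvOptPair ((PySem.List.index? (pvRow plot x).reverse "1").map
      (fun k => ((PySem.List.pyGetD plot 0 []).length : Int) - 1 - (k : Int))) (fun v => (x, v)))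

def pvP4 (plot : List (List String)) : List (Int × Int) :=
  (PySem.List.pyRange (((PySem.List.pyGetD plot 0 []).length : Int) - 1) (-1) (-1)).flatMap
    (fun y => pvOptPair ((PySem.List.index? (pvCol plot y).reverse "1").map
      (fun k => ((plot.length : Int)) - 1 - (k : Int))) (fun v => (v, y)))

-- ascending break-scan = index of first "1"
theorem pv_scan_first (l : List String) (g : Int → String) (a : Int)
    (h : ∀ k : Nat, k < l.length → g (a + (k : Int)) = l.getD k "") :
    pvScanBreak g (PySem.List.pyRange a (a + (l.length : Int)) 1)
      = (PySem.List.index? l "1").map (fun k => a + (k : Int)) := by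
  induction l generalizing a with
  | nil =>
      rw [PySem.List.pyRange_one_eq_nil (by simp)]
      simp [pvScanBreak]
  | cons s t ih =>
      rw [PySem.List.pyRange_one_cons (by simp only [List.length_cons]; push_cast; omega)]
      have hga : g a = s := by simpa using h 0 (by simp)
      by_cases hs : s = "1"
      · subst hs
        rw [PySem.List.index?_cons_self]
        simp [pvScanBreak, hga]
      · have hne : (g a == "1") = false := by
          rw [hga]; exact beq_false_of_ne hs
        have harg : a + ((s :: t).length : Int) = (a + 1) + (t.length : Int) := by
          simp only [List.length_cons]; push_cast; ring
        rw [show pvScanBreak g (a :: PySem.List.pyRange (a + 1) (a + ((s :: t).length : Int)) 1)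
              = pvScanBreak g (PySem.List.pyRange (a + 1) (a + ((s :: t).length : Int)) 1) by
            simp [pvScanBreak, hne]]
        rw [harg, ih (a + 1) (fun k hk => by
          have := h (k + 1) (by simpa using Nat.succ_lt_succ hk)
          simpa [add_assoc, add_comm, add_left_comm] using this)]
        rw [PySem.List.index?_cons_of_ne t hs]
        cases PySem.List.index? t "1" <;> simp <;> push_cast <;> ring

-- descending break-scan = last index holding "1", via index? on the reversal
theorem pv_scan_last (l : List String) (g : Int → String) (a : Int)
    (h : ∀ k : Nat, k < l.length → g (a + (k : Int)) = l.getD k "") :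
    pvScanBreak g (PySem.List.pyRange (a + (l.length : Int) - 1) (a - 1) (-1))
      = (PySem.List.index? l.reverse "1").map (fun k => a + ((l.length : Int) - 1 - (k : Int))) := by
  induction l using List.reverseRecOn with
  | nil =>
      rw [PySem.List.pyRange_neg_one_eq_nil (by simp)]
      simp [pvScanBreak]
  | append_singleton t s ih =>
      rw [show a + (((t ++ [s]).length : Int)) - 1 = a + (t.length : Int) by simp; push_cast; ring]
      rw [PySem.List.pyRange_neg_one_cons (by omega)]
      have hgs : g (a + (t.length : Int)) = s := by
        have := h t.length (by simp)
        simpa [List.getD, List.getElem?_concat_length] using this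
      by_cases hs : s = "1"
      · subst hs
        rw [show (t ++ ["1"]).reverse = "1" :: t.reverse by simp, PySem.List.index?_cons_self]
        simp [pvScanBreak, hgs]
      · have hne : (g (a + (t.length : Int)) == "1") = false := by
          rw [hgs]; exact beq_false_of_ne hs
        have ht : ∀ k : Nat, k < t.length → g (a + (k : Int)) = t.getD k "" := by
          intro k hk
          have := h k (by simp; omega)
          simpa [List.getD, List.getElem?_append_left hk] using this
        rw [show pvScanBreak g ((a + (t.length : Int)) :: PySem.List.pyRange (a + (t.length : Int) - 1) (a - 1) (-1))
              = pvScanBreak g (PySem.List.pyRange (a + (t.length : Int) - 1) (a - 1) (-1)) by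
            simp [pvScanBreak, hne]]
        rw [ih ht]
        rw [show (t ++ [s]).reverse = s :: t.reverse by simp]
        rw [PySem.List.index?_cons_of_ne t.reverse hs]
        cases PySem.List.index? t.reverse "1" <;> simp <;> push_cast <;> ring

-- the two dedup loops agree, given the seen-set mirrors membership in the accumulator
theorem pv_purge_eq (ps : List (Int × Int)) (acc : List (List Int)) (seen : PySem.Set (Int × Int))
    (hinv : ∀ p : Int × Int, p ∈ seen ↔ [p.1, p.2] ∈ acc) :
    (ps.map (fun p => [p.1, p.2])).foldl
        (fun purged item => if purged.contains item then purged else purged ++ [item]) acc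
      = (ps.foldl (fun st p =>
            if PySem.Set.contains st.2 p then st
            else (st.1 ++ [[p.1, p.2]], PySem.Set.add st.2 p)) (acc, seen)).1 := by
  induction ps generalizing acc seen with
  | nil => simp
  | cons p t ih =>
      simp only [List.map_cons, List.foldl_cons]
      by_cases hp : p ∈ seen
      · have h1 : PySem.Set.contains seen p = true := (PySem.Set.contains_iff seen p).mpr hp
        have h2 : acc.contains [p.1, p.2] = true := by
          simpa using (hinv p).mp hp
        rw [h1, h2]
        simp only [if_true]
        exact ih acc seen hinv
      · have h1 : PySem.Set.contains seen p = false := by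
          rcases hc : PySem.Set.contains seen p with _ | _
          · rfl
          · exact absurd (((PySem.Set.contains_iff seen p).mp hc)) hp
        have h2 : acc.contains [p.1, p.2] = false := by
          rcases hc : acc.contains [p.1, p.2] with _ | _
          · rfl
          · exact absurd ((hinv p).mpr (by simpa using hc)) hp
        rw [h1, h2]
        simp only [if_false, Bool.false_eq_true]
        refine ih (acc ++ [[p.1, p.2]]) (PySem.Set.add seen p) ?_
        intro q
        rw [PySem.Set.mem_add]
        constructor
        · rintro (hq | rfl)
          · exact List.mem_append_left _ ((hinv q).mp hq)
          · simp
        · intro hq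
          rcases List.mem_append.mp hq with hq | hq
          · exact Or.inl ((hinv q).mpr hq)
          · right
            have he : [q.1, q.2] = [p.1, p.2] := by simpa using hq
            have h1 : q.1 = p.1 ∧ q.2 = p.2 := by simpa using he
            exact Prod.ext h1.1 h1.2

-- a loop body that appends a per-element chunk is a flatMap
theorem pv_foldl_chunks {ι β : Type} (l : List ι) (body : List β → ι → List β) (F : ι → List β)
    (hb : ∀ (acc : List β), ∀ x ∈ l, body acc x = acc ++ F x) :
    ∀ acc : List β, l.foldl body acc = acc ++ l.flatMap F := by
  induction l with
  | nil => intro acc; simp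
  | cons x t ih =>
      intro acc
      simp only [List.foldl_cons, List.flatMap_cons]
      rw [hb acc x (by simp), ih (fun acc z hz => hb acc z (List.mem_cons_of_mem _ hz)), List.append_assoc]

theorem pv_mem_countdown {m y : Int} (hy : y ∈ PySem.List.pyRange (m - 1) (-1) (-1)) :
    0 ≤ y ∧ y < m := by
  rw [PySem.List.pyRange_neg_one] at hy
  obtain ⟨k, hk, rfl⟩ := List.mem_map.mp hy
  rw [List.mem_range] at hk
  omega

-- ---- facts about pvFirstIdx / pvLastIdx under appending one element ----

theorem pvFirstIdx_eq_none_iff (l : List String) : pvFirstIdx l = none ↔ "1" ∉ l := by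
  rw [pvFirstIdx, ← PySem.List.index?_eq_none_iff]
  cases PySem.List.index? l "1" <;> simp

theorem pvFirstIdx_append (l : List String) (c : String) :
    pvFirstIdx (l ++ [c])
      = if "1" ∈ l then pvFirstIdx l
        else if c = "1" then some (l.length : Int) else none := by
  by_cases hm : "1" ∈ l
  · rw [if_pos hm]
    unfold pvFirstIdx
    rw [PySem.List.index?_append_of_mem [c] hm]
  · rw [if_neg hm]
    by_cases hc : c = "1"
    · subst hc
      rw [if_pos rfl]
      unfold pvFirstIdx
      rw [PySem.List.index?_append_singleton_self l "1" hm]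
      rfl
    · rw [if_neg hc]
      rw [pvFirstIdx_eq_none_iff]
      intro h
      rcases List.mem_append.mp h with h | h
      · exact hm h
      · simp at h
        exact hc h.symm

theorem pvLastIdx_append (l : List String) (c : String) :
    pvLastIdx (l ++ [c]) = if c = "1" then some (l.length : Int) else pvLastIdx l := by
  unfold pvLastIdx
  rw [show (l ++ [c]).reverse = c :: l.reverse by simp]
  by_cases hc : c = "1"
  · subst hc
    rw [PySem.List.index?_cons_self, if_pos rfl]
    simp
  · rw [PySem.List.index?_cons_of_ne l.reverse hc, if_neg hc]
    cases PySem.List.index? l.reverse "1" <;> simp <;> push_cast <;> ring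

-- ---- pvUpd bookkeeping ----

theorem pvUpd_getD_self (t : List (Option Int)) (i : Nat) (hi : i < t.length)
    (h : t.getD i none = none) (o : Option Int) : (pvUpd t i o).getD i none = o := by
  cases o with
  | none => simpa [pvUpd] using h
  | some v => simp [pvUpd, List.getD_eq_getElem?_getD, List.getElem?_set_self, hi]

theorem pv_map_getD (t : List (Option Int)) (M : Nat) (h : t.length = M) :
    (List.range M).map (fun j => t.getD j none) = t := by
  apply List.ext_getElem <;> simp [h, List.getD_eq_getElem?_getD]
  intro i hi
  simp [List.getElem?_eq_getElem (h ▸ hi)]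

-- ---- the single grid pass fills the boundary tables ----

-- inner loop over one row: after processing columns [0, t), the tables hold the
-- first/last "1" of the processed prefix of row x and of each column's processed cells
theorem pv_inner (plot : List (List String)) (x : Nat) (M : Nat)
    (hrowlen : (pvRow plot (x : Int)).length = M)
    (hcell : ∀ k : Nat, k < M →
      PySem.List.pyGetD (PySem.List.pyGetD plot (x : Int) []) (k : Int) "" = (pvRow plot (x : Int)).getD k "")
    (t : Nat) (ht : t ≤ M)
    (rf rl cf cl : List (Option Int))
    (hlrf : x < rf.length) (hlrl : x < rl.length)
    (hlcf : cf.length = M) (hlcl : cl.length = M)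
    (hrfx : rf.getD x none = none) :
    (PySem.List.pyRange 0 (t : Int) 1).foldl (pvStep plot (x : Int)) (rf, rl, cf, cl)
      = (pvUpd rf x (pvFirstIdx ((pvRow plot (x : Int)).take t)),
         pvUpd rl x (pvLastIdx ((pvRow plot (x : Int)).take t)),
         (List.range M).map (fun j =>
           if j < t ∧ (pvRow plot (x : Int)).getD j "" = "1" ∧ cf.getD j none = none
           then some (x : Int) else cf.getD j none),
         (List.range M).map (fun j =>
           if j < t ∧ (pvRow plot (x : Int)).getD j "" = "1"
           then some (x : Int) else cl.getD j none)) := by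
  induction t with
  | zero =>
      rw [PySem.List.pyRange_one_eq_nil (by simp)]
      have h1 : pvFirstIdx ([] : List String) = none := by
        rw [pvFirstIdx_eq_none_iff]; simp
      have h2 : pvLastIdx ([] : List String) = none := by
        simp [pvLastIdx, PySem.List.index?_eq_idxOf?]
      simp only [List.foldl_nil, List.take_zero, h1, h2, pvUpd, Prod.mk.injEq]
      refine ⟨trivial, trivial, ?_, ?_⟩
      · rw [show (fun j => if j < 0 ∧ (pvRow plot (x : Int)).getD j "" = "1" ∧ cf.getD j none = none
              then some (x : Int) else cf.getD j none) = fun j => cf.getD j none by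
            funext j; simp]
        exact (pv_map_getD cf M hlcf).symm
      · rw [show (fun j => if j < 0 ∧ (pvRow plot (x : Int)).getD j "" = "1"
              then some (x : Int) else cl.getD j none) = fun j => cl.getD j none by
            funext j; simp]
        exact (pv_map_getD cl M hlcl).symm
  | succ t ih =>
      have htM : t < M := ht
      have hlt : t < (pvRow plot (x : Int)).length := by omega
      have hlen_take : ((pvRow plot (x : Int)).take t).length = t := by
        simp [List.length_take]; omega
      have htake : (pvRow plot (x : Int)).take (t + 1)
          = (pvRow plot (x : Int)).take t ++ [(pvRow plot (x : Int)).getD t ""] := by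
        rw [List.take_add_one]
        simp [List.getElem?_eq_getElem hlt, List.getD_eq_getElem?_getD]
      have hcast : (((t + 1 : Nat)) : Int) = (t : Int) + 1 := by push_cast; ring
      rw [hcast, PySem.List.pyRange_one_succ_right (by positivity), List.foldl_append,
        ih (by omega), List.foldl_cons, List.foldl_nil]
      simp only [pvStep, hcell t htM]
      by_cases hc1 : (pvRow plot (x : Int)).getD t "" = "1"
      · rw [if_pos (show ((pvRow plot (x : Int)).getD t "" == "1") = true by
          simp only [beq_iff_eq]; exact hc1)]
        simp only [Prod.mk.injEq]
        refine ⟨?_, ?_, ?_, ?_⟩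
        · -- row_first
          rw [htake, pvFirstIdx_append, hc1]
          cases hF : pvFirstIdx ((pvRow plot (x : Int)).take t) with
          | none =>
              have hnm : "1" ∉ (pvRow plot (x : Int)).take t := (pvFirstIdx_eq_none_iff _).mp hF
              rw [if_neg hnm, if_pos rfl, hlen_take]
              have hrd : PySem.List.pyGetD (pvUpd rf x none) (↑x) none = none := by
                rw [PySem.List.pyGetD_natCast]; simpa [pvUpd] using hrfx
              rw [if_pos hrd]
              simp [pvUpd, PySem.List.pySetD_natCast]
          | some f =>
              have hmm : "1" ∈ (pvRow plot (x : Int)).take t := by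
                by_contra hn
                rw [← pvFirstIdx_eq_none_iff, hF] at hn
                simp at hn
              rw [if_pos hmm]
              have hrd : (pvUpd rf x (some f)).getD x none = some f :=
                pvUpd_getD_self rf x hlrf hrfx (some f)
              rw [if_neg (by rw [PySem.List.pyGetD_natCast, hrd]; simp)]
        · -- row_last
          rw [htake, pvLastIdx_append, if_pos hc1, hlen_take]
          cases hL : pvLastIdx ((pvRow plot (x : Int)).take t) with
          | none => simp [pvUpd, PySem.List.pySetD_natCast]
          | some v => simp [pvUpd, PySem.List.pySetD_natCast, List.set_set]
        · -- col_first
          have hread : PySem.List.pyGetD ((List.range M).map (fun j =>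
              if j < t ∧ (pvRow plot (x : Int)).getD j "" = "1" ∧ cf.getD j none = none
              then some (x : Int) else cf.getD j none)) (↑t) none = cf.getD t none := by
            rw [PySem.List.pyGetD_natCast, PySem.List.getD_map_range _ M t none htM]
            simp
          by_cases hcf0 : cf.getD t none = none
          · rw [if_pos (by rw [hread]; exact hcf0), PySem.List.pySetD_natCast]
            apply List.ext_getElem
            · simp
            · intro j hj hj'
              have hjM : j < M := by simpa using hj
              rw [List.getElem_set]
              simp only [List.getElem_map, List.getElem_range]
              by_cases hjt : j = t
              · subst hjt
                rw [if_pos rfl, if_pos ⟨by omega, hc1, hcf0⟩]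
              · rw [if_neg (by omega)]
                exact if_congr ⟨fun ⟨h1, h2⟩ => ⟨by omega, h2⟩, fun ⟨h1, h2⟩ => ⟨by omega, h2⟩⟩ rfl rfl
          · rw [if_neg (by rw [hread]; exact hcf0)]
            apply List.map_congr_left
            intro j hj
            by_cases hjt : j = t
            · subst hjt
              rw [if_neg (by rintro ⟨-, -, h⟩; exact hcf0 h),
                if_neg (by rintro ⟨-, -, h⟩; exact hcf0 h)]
            · exact if_congr ⟨fun ⟨h1, h2⟩ => ⟨by omega, h2⟩, fun ⟨h1, h2⟩ => ⟨by omega, h2⟩⟩ rfl rfl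
        · -- col_last
          rw [PySem.List.pySetD_natCast]
          apply List.ext_getElem
          · simp
          · intro j hj hj'
            have hjM : j < M := by simpa using hj
            rw [List.getElem_set]
            simp only [List.getElem_map, List.getElem_range]
            by_cases hjt : j = t
            · subst hjt
              rw [if_pos rfl, if_pos ⟨by omega, hc1⟩]
            · rw [if_neg (by omega)]
              exact if_congr ⟨fun ⟨h1, h2⟩ => ⟨by omega, h2⟩, fun ⟨h1, h2⟩ => ⟨by omega, h2⟩⟩ rfl rfl
      · rw [if_neg (show ¬ (((pvRow plot (x : Int)).getD t "" == "1") = true) by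
          simp only [beq_iff_eq]; exact hc1)]
        simp only [Prod.mk.injEq]
        refine ⟨?_, ?_, ?_, ?_⟩
        · rw [htake, pvFirstIdx_append]
          by_cases hm : "1" ∈ (pvRow plot (x : Int)).take t
          · rw [if_pos hm]
          · rw [if_neg hm, if_neg hc1, ((pvFirstIdx_eq_none_iff _).mpr hm)]
        · rw [htake, pvLastIdx_append, if_neg hc1]
        · apply List.map_congr_left
          intro j hj
          by_cases hjt : j = t
          · subst hjt
            rw [if_neg (by rintro ⟨-, h, -⟩; exact hc1 h), if_neg (by rintro ⟨-, h, -⟩; exact hc1 h)]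
          · exact if_congr ⟨fun ⟨h1, h2⟩ => ⟨by omega, h2⟩, fun ⟨h1, h2⟩ => ⟨by omega, h2⟩⟩ rfl rfl
        · apply List.map_congr_left
          intro j hj
          by_cases hjt : j = t
          · subst hjt
            rw [if_neg (by rintro ⟨-, h⟩; exact hc1 h), if_neg (by rintro ⟨-, h⟩; exact hc1 h)]
          · exact if_congr ⟨fun ⟨h1, h2⟩ => ⟨by omega, h2⟩, fun ⟨h1, h2⟩ => ⟨by omega, h2⟩⟩ rfl rfl

-- outer loop: after processing rows [0, t), row tables are filled below t and the
-- column tables describe each column's first t cells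
theorem pv_outer (plot : List (List String)) (M : Nat)
    (hrowlen : ∀ i : Nat, i < plot.length → (pvRow plot (i : Int)).length = M)
    (hcell : ∀ i k : Nat, i < plot.length → k < M →
      PySem.List.pyGetD (PySem.List.pyGetD plot (i : Int) []) (k : Int) "" = (pvRow plot (i : Int)).getD k "")
    (htrans : ∀ i j : Nat, i < plot.length → j < M →
      (pvCol plot (j : Int)).getD i "" = (pvRow plot (i : Int)).getD j "")
    (t : Nat) (ht : t ≤ plot.length) :
    (PySem.List.pyRange 0 (t : Int) 1).foldl
        (fun st x => (PySem.List.pyRange 0 (M : Int) 1).foldl (pvStep plot x) st)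
        (List.replicate plot.length none, List.replicate plot.length none,
         List.replicate M none, List.replicate M none)
      = ((List.range plot.length).map (fun i : Nat => if i < t then pvFirstIdx (pvRow plot (i : Int)) else none),
         (List.range plot.length).map (fun i : Nat => if i < t then pvLastIdx (pvRow plot (i : Int)) else none),
         (List.range M).map (fun j : Nat => pvFirstIdx ((pvCol plot (j : Int)).take t)),
         (List.range M).map (fun j : Nat => pvLastIdx ((pvCol plot (j : Int)).take t))) := by
  have hcollen : ∀ j : Int, (pvCol plot j).length = plot.length := by
    intro j; simp [pvCol]
  induction t with
  | zero =>
      rw [show PySem.List.pyRange 0 (((0 : Nat) : Int)) 1 = [] from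
        PySem.List.pyRange_one_eq_nil (by simp)]
      have h1 : pvFirstIdx ([] : List String) = none := by
        rw [pvFirstIdx_eq_none_iff]; simp
      have h2 : pvLastIdx ([] : List String) = none := by
        simp [pvLastIdx, PySem.List.index?_eq_idxOf?]
      simp only [List.foldl_nil, List.take_zero, h1, h2, Prod.mk.injEq]
      have hz : ∀ (n : Nat), (List.range n).map (fun _ : Nat => (none : Option Int))
          = List.replicate n none := by
        intro n
        simp [List.map_const']
      refine ⟨?_, ?_, (hz M).symm, (hz M).symm⟩
      · rw [show (fun i : Nat => if i < 0 then pvFirstIdx (pvRow plot (i : Int)) else none)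
            = fun _ : Nat => (none : Option Int) by funext i; simp]
        exact (hz plot.length).symm
      · rw [show (fun i : Nat => if i < 0 then pvLastIdx (pvRow plot (i : Int)) else none)
            = fun _ : Nat => (none : Option Int) by funext i; simp]
        exact (hz plot.length).symm
  | succ t ih =>
      have htn : t < plot.length := ht
      have hcast : (((t + 1 : Nat)) : Int) = (t : Int) + 1 := by push_cast; ring
      rw [hcast, PySem.List.pyRange_one_succ_right (by positivity), List.foldl_append,
        ih (by omega), List.foldl_cons, List.foldl_nil]
      have hrfx : ((List.range plot.length).map
          (fun i => if i < t then pvFirstIdx (pvRow plot (i : Int)) else none)).getD t none = none := by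
        rw [PySem.List.getD_map_range _ _ t none htn]; simp
      rw [pv_inner plot t M (hrowlen t htn) (fun k hk => hcell t k htn hk) M le_rfl
        _ _ _ _ (by simpa using htn) (by simpa using htn) (by simp) (by simp) hrfx]
      have htkM : (pvRow plot (t : Int)).take M = pvRow plot (t : Int) := by
        rw [← hrowlen t htn]; exact List.take_length
      simp only [htkM, Prod.mk.injEq]
      refine ⟨?_, ?_, ?_, ?_⟩
      · -- row_first table
        cases hF : pvFirstIdx (pvRow plot (t : Int)) with
        | none =>
            show (List.range plot.length).map _ = _
            apply List.map_congr_left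
            intro i hi
            by_cases hit : i = t
            · subst hit
              rw [if_neg (by omega), if_pos (by omega), hF]
            · exact if_congr ⟨by omega, by omega⟩ rfl rfl
        | some f =>
            show ((List.range plot.length).map _).set t (some f) = _
            apply List.ext_getElem
            · simp
            · intro i hi hi'
              have hin : i < plot.length := by simpa using hi
              rw [List.getElem_set]
              simp only [List.getElem_map, List.getElem_range]
              by_cases hit : i = t
              · subst hit
                rw [if_pos rfl, if_pos (by omega), hF]
              · rw [if_neg (by omega)]
                exact if_congr ⟨by omega, by omega⟩ rfl rfl
      · -- row_last table
        cases hL : pvLastIdx (pvRow plot (t : Int)) with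
        | none =>
            show (List.range plot.length).map _ = _
            apply List.map_congr_left
            intro i hi
            by_cases hit : i = t
            · subst hit
              rw [if_neg (by omega), if_pos (by omega), hL]
            · exact if_congr ⟨by omega, by omega⟩ rfl rfl
        | some v =>
            show ((List.range plot.length).map _).set t (some v) = _
            apply List.ext_getElem
            · simp
            · intro i hi hi'
              have hin : i < plot.length := by simpa using hi
              rw [List.getElem_set]
              simp only [List.getElem_map, List.getElem_range]
              by_cases hit : i = t
              · subst hit
                rw [if_pos rfl, if_pos (by omega), hL]
              · rw [if_neg (by omega)]
                exact if_congr ⟨by omega, by omega⟩ rfl rfl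
      · -- col_first table
        apply List.map_congr_left
        intro j hj
        have hjM : j < M := by simpa using hj
        have hcolt : t < (pvCol plot (j : Int)).length := by rw [hcollen]; exact htn
        have hlen_take : ((pvCol plot (j : Int)).take t).length = t := by
          simp [List.length_take]; omega
        have htake : (pvCol plot (j : Int)).take (t + 1)
            = (pvCol plot (j : Int)).take t ++ [(pvCol plot (j : Int)).getD t ""] := by
          rw [List.take_add_one]
          simp [List.getElem?_eq_getElem hcolt, List.getD_eq_getElem?_getD]
        have hgd : ((List.range M).map
            (fun j : Nat => pvFirstIdx ((pvCol plot (j : Int)).take t))).getD j none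
            = pvFirstIdx ((pvCol plot (j : Int)).take t) :=
          PySem.List.getD_map_range _ M j none hjM
        rw [hgd, htake, pvFirstIdx_append, htrans t j htn hjM]
        by_cases hm : "1" ∈ (pvCol plot (j : Int)).take t
        · rw [if_pos hm,
            if_neg (by rintro ⟨-, -, h⟩; exact ((pvFirstIdx_eq_none_iff _).mp h) hm)]
        · rw [if_neg hm, hlen_take]
          have h0 : pvFirstIdx ((pvCol plot (j : Int)).take t) = none :=
            (pvFirstIdx_eq_none_iff _).mpr hm
          by_cases hc1 : (pvRow plot (t : Int)).getD j "" = "1"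
          · rw [if_pos ⟨hjM, hc1, h0⟩, if_pos hc1]
          · rw [if_neg (by rintro ⟨-, h, -⟩; exact hc1 h), if_neg hc1, h0]
      · -- col_last table
        apply List.map_congr_left
        intro j hj
        have hjM : j < M := by simpa using hj
        have hcolt : t < (pvCol plot (j : Int)).length := by rw [hcollen]; exact htn
        have hlen_take : ((pvCol plot (j : Int)).take t).length = t := by
          simp [List.length_take]; omega
        have htake : (pvCol plot (j : Int)).take (t + 1)
            = (pvCol plot (j : Int)).take t ++ [(pvCol plot (j : Int)).getD t ""] := by
          rw [List.take_add_one]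
          simp [List.getElem?_eq_getElem hcolt, List.getD_eq_getElem?_getD]
        have hgd : ((List.range M).map
            (fun j : Nat => pvLastIdx ((pvCol plot (j : Int)).take t))).getD j none
            = pvLastIdx ((pvCol plot (j : Int)).take t) :=
          PySem.List.getD_map_range _ M j none hjM
        rw [hgd, htake, pvLastIdx_append, htrans t j htn hjM]
        by_cases hc1 : (pvRow plot (t : Int)).getD j "" = "1"
        · rw [if_pos ⟨hjM, hc1⟩, if_pos hc1, hlen_take]
        · rw [if_neg (by rintro ⟨-, h⟩; exact hc1 h), if_neg hc1]

-- a filterMap of per-element options is the flatMap of the corresponding singleton chunks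
theorem pv_filterMap_opt {ι : Type} (l : List ι) (F : ι → Option Int) (mk : ι → Int → Int × Int) :
    l.filterMap (fun x => (F x).map (mk x)) = l.flatMap (fun x => pvOptPair (F x) (mk x)) := by
  induction l with
  | nil => rfl
  | cons a t ih =>
      cases h : F a <;> simp [List.filterMap_cons, List.flatMap_cons, h, pvOptPair, ih]

-- folding a body that skips non-(some, some) pairs is folding over the filterMap
theorem pv_foldl_skip {γ : Type} (l : List (Option Int × Option Int))
    (g : γ → (Int × Int) → γ) (init : γ) :
    l.foldl (fun acc p =>
        match pvPairOpt p with
        | some c => g acc c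
        | none => acc) init
      = (l.filterMap pvPairOpt).foldl g init := by
  induction l generalizing init with
  | nil => rfl
  | cons p t ih =>
      rcases p with ⟨x | x, y | y⟩ <;>
        · show List.foldl _ _ t = List.foldl g _ _
          rw [ih]
          rfl

theorem pv_main (plot : List (List String)) (hpre : Pre_gatherOuterPoints plot) :
    gatherOuterPoints plot = gatherOuterPoints_alt plot := by
  obtain ⟨hne, hlen⟩ := hpre
  have hml : ∀ x : Nat, x < plot.length →
      (PySem.List.pyGetD plot 0 []).length ≤ (plot.getD x []).length := by
    intro x hx
    have hhead : PySem.List.pyGetD plot 0 [] = plot.headD [] := by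
      cases plot with
      | nil => exact absurd rfl hne
      | cons a t => simp [PySem.List.pyGetD_zero_cons]
    rw [hhead]
    have hmem : plot.getD x [] ∈ plot := by
      rw [List.getD_eq_getElem?_getD, List.getElem?_eq_getElem hx]
      exact List.getElem_mem hx
    exact hlen _ hmem
  have hrowlen : ∀ x : Int, 0 ≤ x → x < (plot.length : Int) → (pvRow plot x).length = (PySem.List.pyGetD plot 0 []).length := by
    intro x h0 hx
    have hxN : x.toNat < plot.length := by omega
    simp only [pvRow, List.length_take]
    exact Nat.min_eq_left (hml x.toNat hxN)
  have hcollen : ∀ y : Int, (pvCol plot y).length = plot.length := by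
    intro y; simp [pvCol]
  have hgetrow : ∀ x : Int, 0 ≤ x → x < (plot.length : Int) →
      PySem.List.pyGetD plot x [] = plot.getD x.toNat [] := by
    intro x h0 hx
    rw [PySem.List.pyGetD_eq_getElem plot [] h0 (by exact_mod_cast hx)]
    rw [List.getD_eq_getElem?_getD, List.getElem?_eq_getElem (show x.toNat < plot.length by omega)]
    rfl
  have hrowent : ∀ x : Int, 0 ≤ x → x < (plot.length : Int) → ∀ k : Nat, k < (pvRow plot x).length →
      PySem.List.pyGetD (PySem.List.pyGetD plot x []) (0 + (k : Int)) "" = (pvRow plot x).getD k "" := by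
    intro x h0 hx k hk
    have hxN : x.toNat < plot.length := by omega
    have hk' : k < (PySem.List.pyGetD plot 0 []).length := by rw [hrowlen x h0 hx] at hk; exact hk
    have hklen : k < (plot.getD x.toNat []).length := lt_of_lt_of_le hk' (hml _ hxN)
    rw [hgetrow x h0 hx]
    rw [show (0 : Int) + (k : Int) = ((k : Nat) : Int) by ring, PySem.List.pyGetD_natCast]
    simp [pvRow, List.getD_eq_getElem?_getD, List.getElem?_take, hk']
  have hcolent : ∀ y : Int, 0 ≤ y → y < ((PySem.List.pyGetD plot 0 []).length : Int) →
      ∀ k : Nat, k < (pvCol plot y).length →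
      PySem.List.pyGetD (PySem.List.pyGetD plot (0 + (k : Int)) []) y "" = (pvCol plot y).getD k "" := by
    intro y h0 hy k hk
    rw [hcollen] at hk
    rw [show (0 : Int) + (k : Int) = ((k : Nat) : Int) by ring, PySem.List.pyGetD_natCast]
    have h2 : (pvCol plot y).getD k "" = PySem.List.pyGetD (List.take (PySem.List.pyGetD plot 0 []).length (plot.getD k [])) y "" := by
      simp only [pvCol, List.map_map, List.getD_eq_getElem?_getD, List.getElem?_map,
        List.getElem?_eq_getElem hk]
      simp [List.getD_eq_getElem?_getD, List.getElem?_eq_getElem hk]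
    rw [h2]
    have hlenk : (PySem.List.pyGetD plot 0 []).length ≤ (plot.getD k []).length := hml k hk
    have hyN : y.toNat < (PySem.List.pyGetD plot 0 []).length := by omega
    have hy1 : y < ((plot.getD k []).length : Int) := by omega
    have hy2 : y < ((List.take (PySem.List.pyGetD plot 0 []).length (plot.getD k [])).length : Int) := by
      rw [List.length_take, Nat.min_eq_left hlenk]; exact hy
    rw [PySem.List.pyGetD_eq_getElem (plot.getD k []) "" h0 hy1]
    rw [PySem.List.pyGetD_eq_getElem (List.take (PySem.List.pyGetD plot 0 []).length (plot.getD k [])) "" h0 hy2]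
    exact (List.getElem_take).symm

  have hscan1 : ∀ x : Int, 0 ≤ x → x < (plot.length : Int) →
      pvScanBreak (fun y => PySem.List.pyGetD (PySem.List.pyGetD plot x []) y "")
          (PySem.List.pyRange 0 ((PySem.List.pyGetD plot 0 []).length : Int) 1)
        = (PySem.List.index? (pvRow plot x) "1").map (fun k => (k : Int)) := by
    intro x h0 hx
    have h := pv_scan_first (pvRow plot x)
      (fun y => PySem.List.pyGetD (PySem.List.pyGetD plot x []) y "") 0
      (fun k hk => hrowent x h0 hx k hk)
    rw [hrowlen x h0 hx] at h
    simp only [zero_add] at h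
    exact h
  have hscan2 : ∀ y : Int, 0 ≤ y → y < ((PySem.List.pyGetD plot 0 []).length : Int) →
      pvScanBreak (fun x => PySem.List.pyGetD (PySem.List.pyGetD plot x []) y "")
          (PySem.List.pyRange 0 (plot.length : Int) 1)
        = (PySem.List.index? (pvCol plot y) "1").map (fun k => (k : Int)) := by
    intro y h0 hy
    have h := pv_scan_first (pvCol plot y)
      (fun x => PySem.List.pyGetD (PySem.List.pyGetD plot x []) y "") 0
      (fun k hk => hcolent y h0 hy k hk)
    rw [hcollen] at h
    simp only [zero_add] at h
    exact h
  have hscan3 : ∀ x : Int, 0 ≤ x → x < (plot.length : Int) →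
      pvScanBreak (fun y => PySem.List.pyGetD (PySem.List.pyGetD plot x []) y "")
          (PySem.List.pyRange (((PySem.List.pyGetD plot 0 []).length : Int) - 1) (-1) (-1))
        = (PySem.List.index? (pvRow plot x).reverse "1").map
            (fun k => ((PySem.List.pyGetD plot 0 []).length : Int) - 1 - (k : Int)) := by
    intro x h0 hx
    have h := pv_scan_last (pvRow plot x)
      (fun y => PySem.List.pyGetD (PySem.List.pyGetD plot x []) y "") 0
      (fun k hk => hrowent x h0 hx k hk)
    rw [hrowlen x h0 hx] at h
    simp only [zero_add, zero_sub] at h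
    exact h
  have hscan4 : ∀ y : Int, 0 ≤ y → y < ((PySem.List.pyGetD plot 0 []).length : Int) →
      pvScanBreak (fun x => PySem.List.pyGetD (PySem.List.pyGetD plot x []) y "")
          (PySem.List.pyRange ((plot.length : Int) - 1) (-1) (-1))
        = (PySem.List.index? (pvCol plot y).reverse "1").map
            (fun k => (plot.length : Int) - 1 - (k : Int)) := by
    intro y h0 hy
    have h := pv_scan_last (pvCol plot y)
      (fun x => PySem.List.pyGetD (PySem.List.pyGetD plot x []) y "") 0
      (fun k hk => hcolent y h0 hy k hk)
    rw [hcollen] at h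
    simp only [zero_add, zero_sub] at h
    exact h

  simp only [gatherOuterPoints, gatherOuterPoints_alt]
  have hA1 : ∀ acc : List (List Int),
      List.foldl (fun acc x =>
          match pvScanBreak (fun y => PySem.List.pyGetD (PySem.List.pyGetD plot x []) y "")
              (PySem.List.pyRange 0 ((PySem.List.pyGetD plot 0 []).length : Int) 1) with
          | some y => acc ++ [[x, y]]
          | none => acc) acc (PySem.List.pyRange 0 (plot.length : Int) 1)
        = acc ++ (pvP1 plot).map pvToL := by
    intro acc
    refine (pv_foldl_chunks _ _
      (fun x => (pvOptPair ((PySem.List.index? (pvRow plot x) "1").map (fun k => (k : Int)))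
        (fun v => (x, v))).map pvToL) ?_ acc).trans ?_
    · intro acc x hx
      obtain ⟨h0, hxn⟩ := PySem.List.mem_pyRange_one.mp hx
      dsimp only
      rw [hscan1 x h0 hxn]
      cases hidx : PySem.List.index? (pvRow plot x) "1" <;> simp [hidx, pvOptPair, pvToL]
    · simp only [pvP1, List.map_flatMap]
  have hA2 : ∀ acc : List (List Int),
      List.foldl (fun acc y =>
          match pvScanBreak (fun x => PySem.List.pyGetD (PySem.List.pyGetD plot x []) y "")
              (PySem.List.pyRange 0 (plot.length : Int) 1) with
          | some x => acc ++ [[x, y]]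
          | none => acc) acc (PySem.List.pyRange 0 ((PySem.List.pyGetD plot 0 []).length : Int) 1)
        = acc ++ (pvP2 plot).map pvToL := by
    intro acc
    refine (pv_foldl_chunks _ _
      (fun y => (pvOptPair ((PySem.List.index? (pvCol plot y) "1").map (fun k => (k : Int)))
        (fun v => (v, y))).map pvToL) ?_ acc).trans ?_
    · intro acc y hy
      obtain ⟨h0, hyn⟩ := PySem.List.mem_pyRange_one.mp hy
      dsimp only
      rw [hscan2 y h0 hyn]
      cases hidx : PySem.List.index? (pvCol plot y) "1" <;> simp [hidx, pvOptPair, pvToL]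
    · simp only [pvP2, List.map_flatMap]
  have hA3 : ∀ acc : List (List Int),
      List.foldl (fun acc x =>
          match pvScanBreak (fun y => PySem.List.pyGetD (PySem.List.pyGetD plot x []) y "")
              (PySem.List.pyRange (((PySem.List.pyGetD plot 0 []).length : Int) - 1) (-1) (-1)) with
          | some y => acc ++ [[x, y]]
          | none => acc) acc (PySem.List.pyRange 0 (plot.length : Int) 1)
        = acc ++ (pvP3 plot).map pvToL := by
    intro acc
    refine (pv_foldl_chunks _ _
      (fun x => (pvOptPair ((PySem.List.index? (pvRow plot x).reverse "1").map
        (fun k => ((PySem.List.pyGetD plot 0 []).length : Int) - 1 - (k : Int)))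
        (fun v => (x, v))).map pvToL) ?_ acc).trans ?_
    · intro acc x hx
      obtain ⟨h0, hxn⟩ := PySem.List.mem_pyRange_one.mp hx
      dsimp only
      rw [hscan3 x h0 hxn]
      cases hidx : PySem.List.index? (pvRow plot x).reverse "1" <;> simp [hidx, pvOptPair, pvToL]
    · simp only [pvP3, List.map_flatMap]
  have hA4 : ∀ acc : List (List Int),
      List.foldl (fun acc y =>
          match pvScanBreak (fun x => PySem.List.pyGetD (PySem.List.pyGetD plot x []) y "")
              (PySem.List.pyRange ((plot.length : Int) - 1) (-1) (-1)) with
          | some x => acc ++ [[x, y]]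
          | none => acc) acc (PySem.List.pyRange (((PySem.List.pyGetD plot 0 []).length : Int) - 1) (-1) (-1))
        = acc ++ (pvP4 plot).map pvToL := by
    intro acc
    refine (pv_foldl_chunks _ _
      (fun y => (pvOptPair ((PySem.List.index? (pvCol plot y).reverse "1").map
        (fun k => ((plot.length : Int)) - 1 - (k : Int)))
        (fun v => (v, y))).map pvToL) ?_ acc).trans ?_
    · intro acc y hy
      obtain ⟨h0, hyn⟩ := pv_mem_countdown hy
      dsimp only
      rw [hscan4 y h0 hyn]
      cases hidx : PySem.List.index? (pvCol plot y).reverse "1" <;> simp [hidx, pvOptPair, pvToL]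
    · simp only [pvP4, List.map_flatMap]
  rw [hA1, hA2, hA3, hA4]
  simp only [List.nil_append]

  -- ---- B side: the grid pass fills the tables with the per-row / per-column extrema ----
  have hrowlenN : ∀ i : Nat, i < plot.length →
      (pvRow plot (i : Int)).length = (PySem.List.pyGetD plot 0 []).length := by
    intro i hi
    exact hrowlen (i : Int) (by positivity) (by exact_mod_cast hi)
  have hcellN : ∀ i k : Nat, i < plot.length → k < (PySem.List.pyGetD plot 0 []).length →
      PySem.List.pyGetD (PySem.List.pyGetD plot (i : Int) []) (k : Int) ""
        = (pvRow plot (i : Int)).getD k "" := by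
    intro i k hi hk
    have h := hrowent (i : Int) (by positivity) (by exact_mod_cast hi) k
      (by rw [hrowlenN i hi]; exact hk)
    simpa using h
  have htransN : ∀ i j : Nat, i < plot.length → j < (PySem.List.pyGetD plot 0 []).length →
      (pvCol plot (j : Int)).getD i "" = (pvRow plot (i : Int)).getD j "" := by
    intro i j hi hj
    have h1 := hcolent (j : Int) (by positivity) (by exact_mod_cast hj) i
      (by rw [hcollen]; exact hi)
    have h2 := hcellN i j hi hj
    rw [← h1, ← h2]
    norm_num
  rw [show ((plot.length : Int)).toNat = plot.length from Int.toNat_natCast _,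
    show (((PySem.List.pyGetD plot 0 []).length : Int)).toNat = (PySem.List.pyGetD plot 0 []).length from Int.toNat_natCast _]
  rw [pv_outer plot (PySem.List.pyGetD plot 0 []).length hrowlenN hcellN htransN plot.length le_rfl]
  have htkcol : ∀ j : Int, (pvCol plot j).take plot.length = pvCol plot j := by
    intro j; rw [← hcollen j]; exact List.take_length
  -- reading the four tables back
  have hrd1 : (PySem.List.pyRange 0 (plot.length : Int) 1).map (fun x =>
        ((some x : Option Int), PySem.List.pyGetD ((List.range plot.length).map
          (fun i : Nat => if i < plot.length then pvFirstIdx (pvRow plot (i : Int)) else none)) x none))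
      = (PySem.List.pyRange 0 (plot.length : Int) 1).map (fun x =>
        ((some x : Option Int), pvFirstIdx (pvRow plot x))) := by
    apply List.map_congr_left
    intro x hx
    obtain ⟨h0, hxn⟩ := PySem.List.mem_pyRange_one.mp hx
    have hxN : x.toNat < plot.length := by omega
    rw [PySem.List.pyGetD_of_nonneg _ none h0, PySem.List.getD_map_range _ _ _ none hxN,
      if_pos hxN, Int.toNat_of_nonneg h0]
  have hrd3 : (PySem.List.pyRange 0 (plot.length : Int) 1).map (fun x =>
        ((some x : Option Int), PySem.List.pyGetD ((List.range plot.length).map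
          (fun i : Nat => if i < plot.length then pvLastIdx (pvRow plot (i : Int)) else none)) x none))
      = (PySem.List.pyRange 0 (plot.length : Int) 1).map (fun x =>
        ((some x : Option Int), pvLastIdx (pvRow plot x))) := by
    apply List.map_congr_left
    intro x hx
    obtain ⟨h0, hxn⟩ := PySem.List.mem_pyRange_one.mp hx
    have hxN : x.toNat < plot.length := by omega
    rw [PySem.List.pyGetD_of_nonneg _ none h0, PySem.List.getD_map_range _ _ _ none hxN,
      if_pos hxN, Int.toNat_of_nonneg h0]
  have hrd2 : (PySem.List.pyRange 0 ((PySem.List.pyGetD plot 0 []).length : Int) 1).map (fun y =>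
        (PySem.List.pyGetD ((List.range (PySem.List.pyGetD plot 0 []).length).map
          (fun j : Nat => pvFirstIdx ((pvCol plot (j : Int)).take plot.length))) y none, (some y : Option Int)))
      = (PySem.List.pyRange 0 ((PySem.List.pyGetD plot 0 []).length : Int) 1).map (fun y =>
        (pvFirstIdx (pvCol plot y), (some y : Option Int))) := by
    apply List.map_congr_left
    intro y hy
    obtain ⟨h0, hyn⟩ := PySem.List.mem_pyRange_one.mp hy
    have hyN : y.toNat < (PySem.List.pyGetD plot 0 []).length := by omega
    rw [PySem.List.pyGetD_of_nonneg _ none h0, PySem.List.getD_map_range _ _ _ none hyN,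
      htkcol, Int.toNat_of_nonneg h0]
  have hrd4 : (PySem.List.pyRange (((PySem.List.pyGetD plot 0 []).length : Int) - 1) (-1) (-1)).map (fun y =>
        (PySem.List.pyGetD ((List.range (PySem.List.pyGetD plot 0 []).length).map
          (fun j : Nat => pvLastIdx ((pvCol plot (j : Int)).take plot.length))) y none, (some y : Option Int)))
      = (PySem.List.pyRange (((PySem.List.pyGetD plot 0 []).length : Int) - 1) (-1) (-1)).map (fun y =>
        (pvLastIdx (pvCol plot y), (some y : Option Int))) := by
    apply List.map_congr_left
    intro y hy
    obtain ⟨h0, hyn⟩ := pv_mem_countdown hy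
    have hyN : y.toNat < (PySem.List.pyGetD plot 0 []).length := by omega
    rw [PySem.List.pyGetD_of_nonneg _ none h0, PySem.List.getD_map_range _ _ _ none hyN,
      htkcol, Int.toNat_of_nonneg h0]
  rw [hrd1, hrd2, hrd3, hrd4]
  -- the phase fold skips (·, none)/(none, ·) pairs: it is a fold over the filterMap
  have hbody : (fun (acc : List (List Int) × PySem.Set (Int × Int)) (p : Option Int × Option Int) =>
        match p with
        | (some x, some y) =>
            if PySem.Set.contains acc.2 (x, y) then acc
            else (acc.1 ++ [[x, y]], PySem.Set.add acc.2 (x, y))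
        | _ => acc)
      = (fun acc p =>
        match pvPairOpt p with
        | some c =>
            if PySem.Set.contains acc.2 c then acc
            else (acc.1 ++ [[c.1, c.2]], PySem.Set.add acc.2 c)
        | none => acc) := by
    funext acc p
    rcases p with ⟨x | x, y | y⟩ <;> rfl
  rw [hbody]
  rw [pv_foldl_skip _ (fun acc c =>
        if PySem.Set.contains acc.2 c then acc
        else (acc.1 ++ [[c.1, c.2]], PySem.Set.add acc.2 c)) _]
  -- the filtered phase list is exactly A's four chunk lists
  have hf1 : ∀ (l : List Int) (F : Int → Option Int),
      List.filterMap pvPairOpt (l.map (fun x => ((some x : Option Int), F x)))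
        = l.flatMap (fun x => pvOptPair (F x) (fun v => (x, v))) := by
    intro l F
    rw [List.filterMap_map, ← pv_filterMap_opt l F (fun x v => (x, v))]
    apply List.filterMap_congr
    intro x _
    show pvPairOpt (some x, F x) = (F x).map (fun v => (x, v))
    cases F x <;> rfl
  have hf2 : ∀ (l : List Int) (F : Int → Option Int),
      List.filterMap pvPairOpt (l.map (fun y => (F y, (some y : Option Int))))
        = l.flatMap (fun y => pvOptPair (F y) (fun v => (v, y))) := by
    intro l F
    rw [List.filterMap_map, ← pv_filterMap_opt l F (fun y v => (v, y))]
    apply List.filterMap_congr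
    intro y _
    show pvPairOpt (F y, some y) = (F y).map (fun v => (v, y))
    cases F y <;> rfl
  rw [List.filterMap_append, List.filterMap_append, List.filterMap_append,
    hf1 _ (fun x => pvFirstIdx (pvRow plot x)),
    hf2 _ (fun y => pvFirstIdx (pvCol plot y)),
    hf1 _ (fun x => pvLastIdx (pvRow plot x)),
    hf2 _ (fun y => pvLastIdx (pvCol plot y))]
  have he1 : (PySem.List.pyRange 0 (plot.length : Int) 1).flatMap
        (fun x => pvOptPair (pvFirstIdx (pvRow plot x)) (fun v => (x, v))) = pvP1 plot := by
    rfl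
  have he2 : (PySem.List.pyRange 0 ((PySem.List.pyGetD plot 0 []).length : Int) 1).flatMap
        (fun y => pvOptPair (pvFirstIdx (pvCol plot y)) (fun v => (v, y))) = pvP2 plot := by
    rfl
  have he3 : (PySem.List.pyRange 0 (plot.length : Int) 1).flatMap
        (fun x => pvOptPair (pvLastIdx (pvRow plot x)) (fun v => (x, v))) = pvP3 plot := by
    apply List.flatMap_congr
    intro x hx
    obtain ⟨h0, hxn⟩ := PySem.List.mem_pyRange_one.mp hx
    rw [pvLastIdx, hrowlen x h0 hxn]
  have he4 : (PySem.List.pyRange (((PySem.List.pyGetD plot 0 []).length : Int) - 1) (-1) (-1)).flatMap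
        (fun y => pvOptPair (pvLastIdx (pvCol plot y)) (fun v => (v, y))) = pvP4 plot := by
    apply List.flatMap_congr
    intro y hy
    rw [pvLastIdx, hcollen y]
  rw [he1, he2, he3, he4]
  rw [← List.map_append, ← List.map_append, ← List.map_append]
  exact pv_purge_eq (pvP1 plot ++ pvP2 plot ++ pvP3 plot ++ pvP4 plot) [] PySem.Set.empty
    (by intro p; simp [PySem.Set.empty])

-- ===== VERDICT (by name: the statement is the Claim_ definition above) =====
theorem gatherOuterPoints_spec : Claim_equal_gatherOuterPoints := by
  intro plot _ hpre
  unfold Spec_gatherOuterPoints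
  exact pv_main plot hpre
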